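-- pv_equiv track=rewrite | github.com/haukelicht/galtan_group_appeals | code/mention-detection/utils/metrics.py | _correct_iob2
-- ===== SOURCE A (Python) =====
-- from typing import List,  Dict, Tuple, Optional, Union, Literal
--
-- def _correct_iob2(labels: List[str]):
--     prev = None
--     edit = list()
--     for i, l in enumerate(labels):
--         if (i == 0 or prev == 'O') and l[0] == 'I':
--             edit.append(i)
--         prev = l
--     if len(edit) > 0:
--         labels = [l.replace('I-', 'B-') if i in edit else l for i, l in enumerate(labels)]
--     return labels
-- ===== SOURCE B (Python) =====
-- def _correct_iob2(labels):
--     # single pass: fix each invalid 'I' tag inline instead of collecting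
--     # edit indices first and rescanning with 'i in edit'
--     out = []
--     prev = None
--     for l in labels:
--         if (prev is None or prev == 'O') and l[0] == 'I':
--             out.append(l.replace('I-', 'B-'))
--         else:
--             out.append(l)
--         prev = l
--     return out
-- ===== Notes on version B (the rewrite author's own statement) =====
-- stated objective: simpler
-- what changed: Single pass that rewrites each invalid I-tag inline as the output is built, replacing A's two-pass scheme of collecting edit indices and then rebuilding the list with an 'i in edit' membership scan per element.
import Mathlib
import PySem

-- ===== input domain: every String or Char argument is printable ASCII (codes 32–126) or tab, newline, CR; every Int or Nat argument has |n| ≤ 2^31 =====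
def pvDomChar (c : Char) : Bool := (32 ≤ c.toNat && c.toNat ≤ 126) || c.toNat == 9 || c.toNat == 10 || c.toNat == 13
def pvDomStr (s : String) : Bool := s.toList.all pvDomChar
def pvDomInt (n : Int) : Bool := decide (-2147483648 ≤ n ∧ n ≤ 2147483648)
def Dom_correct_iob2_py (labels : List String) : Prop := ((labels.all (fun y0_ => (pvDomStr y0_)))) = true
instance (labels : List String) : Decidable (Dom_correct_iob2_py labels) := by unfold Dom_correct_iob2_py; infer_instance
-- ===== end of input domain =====

-- B is a single pass rewriting invalid I-tags inline; A collects edit indices, then rebuilds with a membership test.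
-- Equivalence of RETURN values is proved on Pre_, the inputs where Python A does not raise IndexError.

-- ===== PORT A =====
def correct_iob2_py (labels : List String) : List String :=
  -- for i, l in enumerate(labels): if (i == 0 or prev == 'O') and l[0] == 'I': edit.append(i); prev = l
  let st := (PySem.List.enumerate labels 0).foldl
    (fun (st : Option String × List Int) (p : Int × String) =>
      let edit := if (p.1 == 0 || st.1 == some "O") && (PySem.Str.pyGet? p.2 0 == some 'I')
                  then st.2 ++ [p.1] else st.2
      (some p.2, edit)) (none, [])
  let edit := st.2
  if edit.length > 0 then
    (PySem.List.enumerate labels 0).map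
      (fun (p : Int × String) =>
        if edit.contains p.1 then PySem.Str.replace p.2 "I-" "B-" else p.2)
  else labels

-- ===== PORT B =====
-- prevOk = (prev is None or prev == 'O')
def correct_iob2_alt_go (prevOk : Bool) : List String → List String
  | [] => []
  | l :: ls =>
      (if prevOk && (PySem.Str.pyGet? l 0 == some 'I')
       then PySem.Str.replace l "I-" "B-" else l) :: correct_iob2_alt_go (l == "O") ls

def correct_iob2_py_alt (labels : List String) : List String :=
  correct_iob2_alt_go true labels

-- ===== PRECONDITION & SPEC =====
-- Pre_ excludes exactly the inputs on which Python A raises IndexError: an empty-string label at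
-- position 0 or right after an 'O' label (elsewhere the short-circuiting guard skips l[0]).
def Pre_correct_iob2_py (labels : List String) : Prop :=
  ((labels.head?.getD "x" != "") &&
   ((labels.zip labels.tail).all (fun p => !(p.1 == "O" && p.2 == "")))) = true
instance (labels : List String) : Decidable (Pre_correct_iob2_py labels) := by
  unfold Pre_correct_iob2_py; infer_instance

def pvWitness_correct_iob2_py : List String := ["I-PER", "I-PER", "O", "I-LOC"]

def Spec_correct_iob2_py (labels : List String) (out : List String) : Prop := out = correct_iob2_py_alt labels
instance (labels : List String) (out : List String) : Decidable (Spec_correct_iob2_py labels out) := by unfold Spec_correct_iob2_py; infer_instance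

-- ===== CLAIM (what is proved, stated in full; the proofs are below) =====
def Claim_equal_correct_iob2_py : Prop := ∀ (labels : List String), Dom_correct_iob2_py labels → Pre_correct_iob2_py labels → Spec_correct_iob2_py labels (correct_iob2_py labels)

-- ===== LEMMAS AND PROOFS =====

-- the list of edit indices A's first loop produces, starting at index i with previous label prev
def editFrom (prev : Option String) (i : Int) : List String → List Int
  | [] => []
  | l :: ls =>
      (if (i == 0 || prev == some "O") && (PySem.Str.pyGet? l 0 == some 'I')
       then [i] else []) ++ editFrom (some l) (i + 1) ls

theorem fold_snd_eq_editFrom (ls : List String) (prev : Option String) (i : Int) (acc : List Int) :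
    ((PySem.List.enumerate ls i).foldl
      (fun (st : Option String × List Int) (p : Int × String) =>
        let edit := if (p.1 == 0 || st.1 == some "O") && (PySem.Str.pyGet? p.2 0 == some 'I')
                    then st.2 ++ [p.1] else st.2
        (some p.2, edit)) (prev, acc)).2 = acc ++ editFrom prev i ls := by
  induction ls generalizing prev i acc with
  | nil => simp [PySem.List.enumerate_nil, editFrom]
  | cons l ls ih =>
      simp only [PySem.List.enumerate_cons, List.foldl_cons, editFrom]
      rw [ih]
      split <;> simp

theorem editFrom_ge (ls : List String) (prev : Option String) (i : Int) :
    ∀ j ∈ editFrom prev i ls, i ≤ j := by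
  induction ls generalizing prev i with
  | nil => simp [editFrom]
  | cons l ls ih =>
      intro j hj
      simp only [editFrom, List.mem_append] at hj
      rcases hj with hj | hj
      · split at hj <;> simp_all
      · have := ih (some l) (i + 1) j hj; omega

theorem cond_succ (l : String) (i : Int) (hi : 0 ≤ i) :
    ((i + 1 : Int) == 0 || some l == some "O") = (l == "O") := by
  have h0 : ((i + 1 : Int) == 0) = false := by simp; omega
  simp [h0]

theorem map_eq_altGo (ls : List String) (prev : Option String) (i : Int) (E₁ : List Int)
    (hi : 0 ≤ i) (hE : ∀ j ∈ E₁, j < i) :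
    (PySem.List.enumerate ls i).map
      (fun (p : Int × String) =>
        if (E₁ ++ editFrom prev i ls).contains p.1
        then PySem.Str.replace p.2 "I-" "B-" else p.2)
    = correct_iob2_alt_go (i == 0 || prev == some "O") ls := by
  induction ls generalizing prev i E₁ with
  | nil => simp [PySem.List.enumerate_nil, correct_iob2_alt_go]
  | cons l ls ih =>
      simp only [PySem.List.enumerate_cons, List.map_cons, correct_iob2_alt_go, editFrom]
      have hcont : ((E₁ ++ ((if ((i == 0 || prev == some "O") && PySem.Str.pyGet? l 0 == some 'I') = true then [i] else []) ++ editFrom (some l) (i + 1) ls)).contains i)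
          = ((i == 0 || prev == some "O") && PySem.Str.pyGet? l 0 == some 'I') := by
        by_cases hc : ((i == 0 || prev == some "O") && PySem.Str.pyGet? l 0 == some 'I') = true
        · simp only [hc, if_pos]
          rw [List.contains_eq_mem]
          simp
        · have hcf : ((i == 0 || prev == some "O") && PySem.Str.pyGet? l 0 == some 'I') = false :=
            Bool.not_eq_true _ ▸ Bool.eq_false_iff.mpr hc
          rw [hcf, List.contains_eq_mem]
          apply decide_eq_false
          simp only [Bool.false_eq_true, if_neg, not_false_eq_true, List.nil_append,
            List.mem_append]
          rintro (hj | hj)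
          · exact absurd (hE i hj) (lt_irrefl i)
          · have := editFrom_ge ls (some l) (i + 1) i hj; omega
      rw [hcont]
      congr 1
      have hE' : ∀ j ∈ E₁ ++ (if ((i == 0 || prev == some "O") && PySem.Str.pyGet? l 0 == some 'I') = true then [i] else []), j < i + 1 := by
        intro j hj
        rcases List.mem_append.1 hj with hj | hj
        · have := hE j hj; omega
        · split at hj <;> simp_all
      have hrec := ih (some l) (i + 1) (E₁ ++ (if ((i == 0 || prev == some "O") && PySem.Str.pyGet? l 0 == some 'I') = true then [i] else [])) (by omega) hE'
      rw [List.append_assoc, cond_succ l i hi] at hrec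
      exact hrec

theorem editFrom_nil_altGo (ls : List String) (prev : Option String) (i : Int) (hi : 0 ≤ i) :
    editFrom prev i ls = [] → correct_iob2_alt_go (i == 0 || prev == some "O") ls = ls := by
  induction ls generalizing prev i with
  | nil => simp [correct_iob2_alt_go]
  | cons l ls ih =>
      intro h
      simp only [editFrom] at h
      rcases List.append_eq_nil_iff.1 h with ⟨h1, h2⟩
      have hc : ((i == 0 || prev == some "O") && (PySem.Str.pyGet? l 0 == some 'I')) = false := by
        by_contra hcc; simp only [Bool.not_eq_false] at hcc
        rw [hcc] at h1; simp at h1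
      have hrec := ih (some l) (i + 1) (by omega) h2
      rw [cond_succ l i hi] at hrec
      simp only [correct_iob2_alt_go, hc, Bool.false_eq_true, if_neg, not_false_eq_true, hrec]

-- ===== VERDICT (by name: the statement is the Claim_ definition above) =====
theorem correct_iob2_py_spec : Claim_equal_correct_iob2_py := by
  intro labels _ _
  unfold Spec_correct_iob2_py correct_iob2_py correct_iob2_py_alt
  simp only
  rw [fold_snd_eq_editFrom labels none 0 []]
  simp only [List.nil_append]
  by_cases h : (editFrom none 0 labels).length > 0
  · rw [if_pos h]
    have := map_eq_altGo labels none 0 [] (le_refl 0) (by simp)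
    simp only [List.nil_append] at this
    simpa using this
  · rw [if_neg h]
    have hnil : editFrom none 0 labels = [] := by
      cases heq : editFrom none 0 labels with
      | nil => rfl
      | cons a t => rw [heq] at h; simp at h
    have := editFrom_nil_altGo labels none 0 (le_refl 0) hnil
    simpa using this.symm
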